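-- pv_equiv track=rewrite | github.com/GeburtstagsTorte/Homework | Homework Solution/Samuel/TEST 1.py | is_permutation_v2
-- ===== SOURCE A (Python) =====
-- def is_permutation_v2(lst):
--     if not lst:
--         return False
--
--     s = [x for x in range(min(lst), max(lst) + 1)]
--
--     if sorted(lst) == s:
--         return True
--     else:
--         return False
-- ===== SOURCE B (Python) =====
-- def is_permutation_v2(lst):
--     if not lst:
--         return False
--     if len(set(lst)) != len(lst):
--         return False
--     return max(lst) - min(lst) + 1 == len(lst)
-- ===== Notes on version B (the rewrite author's own statement) =====
-- stated objective: faster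
-- what changed: Replaces sorting the list and materialising the whole consecutive range with an O(n) check: all elements distinct (via a set) and max-min+1 equals the length.
import Mathlib
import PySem

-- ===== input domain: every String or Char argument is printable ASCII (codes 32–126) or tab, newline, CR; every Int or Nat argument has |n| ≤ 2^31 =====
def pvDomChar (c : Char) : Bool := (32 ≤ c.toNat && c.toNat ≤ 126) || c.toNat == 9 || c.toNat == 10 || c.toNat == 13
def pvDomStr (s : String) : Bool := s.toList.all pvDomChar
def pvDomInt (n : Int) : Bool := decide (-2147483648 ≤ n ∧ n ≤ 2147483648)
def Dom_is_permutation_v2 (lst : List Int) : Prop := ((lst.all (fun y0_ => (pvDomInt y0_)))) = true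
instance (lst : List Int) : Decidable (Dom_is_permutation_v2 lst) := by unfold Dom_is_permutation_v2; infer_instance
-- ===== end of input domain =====

-- B replaces A's sort-and-compare-with-the-full-range by an O(n) check (distinctness via a set, span = length): faster asymptotically.

-- ===== PORT A =====
def is_permutation_v2 (lst : List Int) : Bool :=
  if lst = [] then false
  else
    match PySem.List.min? lst (fun x => x), PySem.List.max? lst (fun x => x) with
    | some mn, some mx =>
      let s := PySem.List.pyRange mn (mx + 1) 1
      if PySem.List.sorted lst (fun x => x) false = s then true else false
    | _, _ => false

-- ===== PORT B =====
def is_permutation_v2_alt (lst : List Int) : Bool :=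
  if lst = [] then false
  else if (PySem.Set.ofList lst).length ≠ lst.length then false
  else
    match lst with
    | [] => false
    -- max(lst) / min(lst) are the running-max/min folds (PySem.List.max?_id_cons / min?_id_cons)
    | x :: t => decide (t.foldl max x - t.foldl min x + 1 = (lst.length : Int))

-- ===== PRECONDITION & SPEC =====
def Spec_is_permutation_v2 (lst : List Int) (out : Bool) : Prop := out = is_permutation_v2_alt lst
instance (lst : List Int) (out : Bool) : Decidable (Spec_is_permutation_v2 lst out) := by unfold Spec_is_permutation_v2; infer_instance

-- ===== CLAIM (what is proved, stated in full; the proofs are below) =====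
def Claim_equal_is_permutation_v2 : Prop := ∀ (lst : List Int), Dom_is_permutation_v2 lst → Spec_is_permutation_v2 lst (is_permutation_v2 lst)

-- ===== LEMMAS AND PROOFS =====

-- len(set(lst)) == len(lst) characterises distinctness
lemma ofList_length_eq_iff_nodup (lst : List Int) :
    (PySem.Set.ofList lst).length = lst.length ↔ lst.Nodup := by
  constructor
  · intro h
    have hperm : (PySem.Set.ofList lst).Perm lst.dedup :=
      (List.perm_ext_iff_of_nodup (PySem.Set.nodup_ofList lst) (List.nodup_dedup lst)).mpr
        (fun a => by rw [PySem.Set.mem_ofList, List.mem_dedup])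
    have hlen : lst.dedup.length = lst.length := by rw [← hperm.length_eq, h]
    have := (List.dedup_sublist lst).eq_of_length hlen
    exact this ▸ List.nodup_dedup lst
  · intro h
    rw [PySem.Set.ofList_eq_self_of_nodup lst h]

-- A's sorted-list comparison characterised by B's two conditions
lemma sorted_eq_range_iff (lst : List Int) (mn mx : Int)
    (hm : PySem.List.min? lst (fun x => x) = some mn)
    (hM : PySem.List.max? lst (fun x => x) = some mx) :
    PySem.List.sorted lst (fun x => x) false = PySem.List.pyRange mn (mx + 1) 1
      ↔ (lst.Nodup ∧ mx - mn + 1 = (lst.length : Int)) := by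
  have hmnmx : mn ≤ mx := PySem.List.max?_isMax hM mn (PySem.List.min?_mem hm)
  constructor
  · intro hs
    have hperm : (PySem.List.pyRange mn (mx + 1) 1).Perm lst := hs ▸ PySem.List.sorted_perm lst (fun x => x) false
    refine ⟨hperm.nodup (PySem.List.nodup_pyRange_one mn (mx + 1)), ?_⟩
    have := hperm.length_eq
    rw [PySem.List.length_pyRange_one] at this
    omega
  · rintro ⟨hnd, hlen⟩
    have hsub : lst ⊆ PySem.List.pyRange mn (mx + 1) 1 := by
      intro x hx
      exact PySem.List.mem_pyRange_one.mpr
        ⟨PySem.List.min?_isMin hm x hx, by have := PySem.List.max?_isMax hM x hx; omega⟩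
    have hperm : lst.Perm (PySem.List.pyRange mn (mx + 1) 1) :=
      (List.subperm_of_subset hnd hsub).perm_of_length_le
        (by rw [PySem.List.length_pyRange_one]; omega)
    exact PySem.List.sorted_eq_of_perm_of_pairwise_lt lst (PySem.List.pyRange mn (mx + 1) 1)
      (fun x => x) hperm.symm (PySem.List.pairwise_lt_pyRange_one mn (mx + 1))

-- ===== VERDICT (by name: the statement is the Claim_ definition above) =====
theorem is_permutation_v2_spec : Claim_equal_is_permutation_v2 := by
  intro lst _
  unfold Spec_is_permutation_v2 is_permutation_v2 is_permutation_v2_alt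
  by_cases hnil : lst = []
  · simp [hnil]
  · obtain ⟨mn, hm⟩ : ∃ m, PySem.List.min? lst (fun x => x) = some m := by
      cases h : PySem.List.min? lst (fun x => x) with
      | none => exact absurd ((PySem.List.min?_eq_none_iff _ _).mp h) hnil
      | some m => exact ⟨m, rfl⟩
    obtain ⟨mx, hM⟩ : ∃ m, PySem.List.max? lst (fun x => x) = some m := by
      cases h : PySem.List.max? lst (fun x => x) with
      | none => exact absurd ((PySem.List.max?_eq_none_iff _ _).mp h) hnil
      | some m => exact ⟨m, rfl⟩
    obtain ⟨x, t, rfl⟩ : ∃ x t, lst = x :: t := by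
      cases lst with
      | nil => exact absurd rfl hnil
      | cons x t => exact ⟨x, t, rfl⟩
    have hmx : t.foldl max x = mx := by
      rw [PySem.List.max?_id_cons] at hM; injection hM
    have hmn : t.foldl min x = mn := by
      rw [PySem.List.min?_id_cons] at hm; injection hm
    simp only [hnil, if_false, hm, hM]
    by_cases hs : PySem.List.sorted (x :: t) (fun x => x) false = PySem.List.pyRange mn (mx + 1) 1
    · obtain ⟨hnd, hlen⟩ := (sorted_eq_range_iff (x :: t) mn mx hm hM).mp hs
      simp [hs, (ofList_length_eq_iff_nodup _).mpr hnd, hmx, hmn, hlen]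
    · simp only [hs, if_false]
      by_cases hnd : (PySem.Set.ofList (x :: t)).length = (x :: t).length
      · have hnd' := (ofList_length_eq_iff_nodup (x :: t)).mp hnd
        have hne : ¬ (mx - mn + 1 = ((x :: t).length : Int)) := fun hlen =>
          hs ((sorted_eq_range_iff (x :: t) mn mx hm hM).mpr ⟨hnd', hlen⟩)
        simp only [List.length_cons] at hne
        simp [hnd, hmx, hmn]
        omega
      · simp only [List.length_cons] at hnd
        simp
        exact fun h => absurd h hnd
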